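-- pv_equiv track=rewrite | github.com/sousaalex/bluma-cli | cli/backend/core/context_utils.py | create_api_context_window
-- ===== SOURCE A (Python) =====
-- from typing import List, Dict, Optional
--
-- def create_api_context_window(full_history: List[Dict], max_turns: Optional[int]) -> List[Dict]:
--     """
--     Retorna uma janela de contexto otimizada para a API.
--
--     REGRAS:
--     1.  Sempre inclui todas as mensagens 'system' do início do histórico.
--     2.  Inclui os últimos N 'turnos completos' do histórico passado.
--         - Um turno completo começa em 'user' e termina em 'agent_end_task'.
--     3.  Sempre inclui o turno atual (o mais recente), mesmo que esteja em andamento.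
--         - Isso garante que o agente sempre saiba qual é a tarefa atual.
--
--     COMPORTAMENTO ESPECIAL:
--     - Se max_turns=None, retorna o histórico completo sem cortes.
--     """
--     if not full_history:
--         return []
--
--     if max_turns is None:
--         # Retorna uma cópia do histórico completo sem aplicar filtros.
--         return full_history[:]
--
--     # 1. Isolar as mensagens de sistema do início do histórico.
--     system_msgs = []
--     idx = 0
--     while idx < len(full_history) and full_history[idx].get("role") == "system":
--         system_msgs.append(full_history[idx])
--         idx += 1
--
--     # 2. Percorrer o histórico restante (sem as msgs de sistema) de trás para frente.
--     # O objetivo é encontrar os turnos completos mais recentes.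
--     turns = []
--     current_turn = []
--     found_turns = 0
--     in_turn = False
--
--     history_without_system = full_history[idx:]
--
--     for msg in reversed(history_without_system):
--         current_turn.insert(0, msg)
--
--         if msg.get("role") == "user":
--             in_turn = True
--
--         # Verifica se um turno completo foi encontrado.
--         if (msg.get("role") == "tool" and msg.get("name") == "agent_end_task" and in_turn):
--             found_turns += 1
--             # Adiciona o turno completo à lista de turnos.
--             turns.insert(0, current_turn.copy())
--             # Limpa para começar a procurar o próximo turno.
--             current_turn.clear()
--             in_turn = False
--
--         # Para a busca se já encontramos o número desejado de turnos COMPLETOS.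
--         if found_turns >= max_turns:
--             break
--
--     # --------------------------------------------------------------------
--     # >>> INÍCIO DA CORREÇÃO CRÍTICA <<<
--     # --------------------------------------------------------------------
--     # 3. Adicionar o turno atual (em andamento) de volta.
--     # Se `current_turn` ainda contém mensagens, significa que o loop terminou
--     # no meio de um turno (o turno mais recente). Este turno é essencial
--     # para o agente saber o que fazer a seguir.
--     if current_turn:
--         turns.insert(0, current_turn)
--     # --------------------------------------------------------------------
--     # >>> FIM DA CORREÇÃO CRÍTICA <<<
--     # --------------------------------------------------------------------
--
--     # 4. Montar a janela de contexto final.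
--     # Junta as mensagens de sistema com todas as mensagens dos turnos selecionados.
--     context_window = system_msgs + [msg for turn in turns for msg in turn]
--
--     return context_window
-- ===== SOURCE B (Python) =====
-- from typing import List, Dict, Optional
--
-- def create_api_context_window(full_history: List[Dict], max_turns: Optional[int]) -> List[Dict]:
--     # The window is always the leading system messages plus one contiguous suffix of
--     # the remaining history, so a single forward scan computing a cut index suffices.
--     if not full_history:
--         return []
--     if max_turns is None:
--         return full_history[:]
--
--     idx = 0
--     while idx < len(full_history) and full_history[idx].get("role") == "system":
--         idx += 1
--     rest = full_history[idx:]
--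
--     # Positions of completed-turn boundaries: an 'agent_end_task' tool message that is
--     # the last such message before some later user message.
--     boundaries = []
--     cand = None
--     for i, msg in enumerate(rest):
--         if msg.get("role") == "tool" and msg.get("name") == "agent_end_task":
--             cand = i
--         elif msg.get("role") == "user" and cand is not None:
--             boundaries.append(cand)
--             cand = None
--
--     # Valid cut points: each completed-turn boundary, plus the very last message
--     # (the minimal window).  Keeping max_turns completed turns means cutting at the
--     # (max_turns+1)-th cut point from the end, if there are that many.
--     cuts = boundaries + [len(rest) - 1]
--     k = max_turns + 1
--     start = cuts[-k] if k <= len(cuts) else 0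
--     return full_history[:idx] + rest[start:]
-- ===== Notes on version B (the rewrite author's own statement) =====
-- stated objective: alternative
-- what changed: B replaces A's backward turn-grouping loop (building current_turn/turns nested lists and flattening them) by a single forward scan that records completed-turn cut positions and computes one cut index, returning the system prefix plus one list suffix; Pre_ excludes negative max_turns, a count outside the function's natural domain, where B's cut-point indexing can raise while A accidentally returns only the last message.
-- outside the precondition, e.g. on create_api_context_window([{}, {}], -2): A returns [{}], B raises IndexError
import Mathlib
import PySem

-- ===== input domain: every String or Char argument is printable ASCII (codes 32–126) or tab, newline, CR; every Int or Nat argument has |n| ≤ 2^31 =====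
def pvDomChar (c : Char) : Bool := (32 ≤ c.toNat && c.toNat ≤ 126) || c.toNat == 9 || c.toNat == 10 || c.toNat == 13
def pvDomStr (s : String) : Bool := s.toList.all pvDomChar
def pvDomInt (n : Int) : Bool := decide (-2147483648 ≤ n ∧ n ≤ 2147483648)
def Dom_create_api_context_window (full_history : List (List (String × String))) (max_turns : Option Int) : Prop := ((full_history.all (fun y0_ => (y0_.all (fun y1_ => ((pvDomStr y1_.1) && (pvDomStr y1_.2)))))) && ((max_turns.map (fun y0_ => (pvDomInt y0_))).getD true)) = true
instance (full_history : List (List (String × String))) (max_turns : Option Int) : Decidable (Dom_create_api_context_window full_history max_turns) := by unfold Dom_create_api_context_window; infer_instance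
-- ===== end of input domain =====

-- B replaces A's backward turn-grouping loop (nested current_turn/turns lists, flattened at the end)
-- by a forward scan that records completed-turn cut positions and computes one cut index
-- (objective: alternative decomposition; neither program mutates its input).

-- ===== PORT A =====

-- msg.get("role") / msg.get("name") — dicts are association lists, first-match lookup
def pvGetKey (m : List (String × String)) (k : String) : Option String :=
  (PySem.Dict.mk m).get? k

-- the 'while … role == "system"' prefix loop: returns (system_msgs, history_without_system)
def pvA_sysLoop : List (List (String × String)) → List (List (String × String)) × List (List (String × String))
  | [] => ([], [])
  | m :: hs =>
    if pvGetKey m "role" = some "system" then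
      let p := pvA_sysLoop hs
      (m :: p.1, p.2)
    else ([], m :: hs)

-- the 'for msg in reversed(history_without_system)' loop, with its break;
-- state (current_turn, turns, found_turns, in_turn); returns (turns, current_turn)
def pvA_loop (maxT : Int) : List (List (String × String)) → List (List (String × String)) →
    List (List (List (String × String))) → Int → Bool →
    (List (List (List (String × String))) × List (List (String × String)))
  | [], cur, turns, _, _ => (turns, cur)
  | m :: ms, cur, turns, found, inT =>
    let cur' := m :: cur
    let inT' := if pvGetKey m "role" = some "user" then true else inT
    if pvGetKey m "role" = some "tool" ∧ pvGetKey m "name" = some "agent_end_task" ∧ inT' = true then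
      if found + 1 ≥ maxT then ((cur' :: turns), [])
      else pvA_loop maxT ms [] (cur' :: turns) (found + 1) false
    else
      if found ≥ maxT then (turns, cur')
      else pvA_loop maxT ms cur' turns found inT'

def create_api_context_window (full_history : List (List (String × String))) (max_turns : Option Int) : List (List (String × String)) :=
  if full_history = [] then []
  else
    match max_turns with
    | none => full_history
    | some t =>
      let sp := pvA_sysLoop full_history
      let res := pvA_loop t sp.2.reverse [] [] 0 false
      let turns := if res.2 ≠ [] then res.2 :: res.1 else res.1
      sp.1 ++ turns.flatten

-- ===== PORT B =====

-- number of leading 'system' messages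
def pvB_sysIdx : List (List (String × String)) → Nat
  | [] => 0
  | m :: hs => if (PySem.Dict.mk m).get? "role" = some "system" then pvB_sysIdx hs + 1 else 0

-- forward scan: cand = index of the last yet-unmatched agent_end_task tool message,
-- boundaries = positions of completed-turn boundaries, in increasing order
def pvB_scan : List (List (String × String)) → Nat → Option Nat → List Nat → Option Nat × List Nat
  | [], _, cand, bds => (cand, bds)
  | m :: ms, i, cand, bds =>
    if (PySem.Dict.mk m).get? "role" = some "tool" ∧ (PySem.Dict.mk m).get? "name" = some "agent_end_task" then
      pvB_scan ms (i + 1) (some i) bds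
    else if (PySem.Dict.mk m).get? "role" = some "user" ∧ cand ≠ none then
      pvB_scan ms (i + 1) none (bds ++ [cand.getD 0])
    else
      pvB_scan ms (i + 1) cand bds

def create_api_context_window_alt (full_history : List (List (String × String))) (max_turns : Option Int) : List (List (String × String)) :=
  if full_history = [] then []
  else
    match max_turns with
    | none => full_history
    | some t =>
      let idx := pvB_sysIdx full_history
      let rest := full_history.drop idx
      let bds := (pvB_scan rest 0 none []).2
      -- cuts = boundaries + [len(rest) - 1]
      let cuts : List Int := bds.map Int.ofNat ++ [(rest.length : Int) - 1]
      -- start = cuts[-(max_turns+1)] if max_turns+1 <= len(cuts) else 0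
      let start : Int := if t + 1 ≤ (cuts.length : Int) then (PySem.List.pyGet? cuts (-(t + 1))).getD 0 else 0
      full_history.take idx ++ PySem.List.slice rest (some start) none

-- ===== PRECONDITION & SPEC =====
-- Pre_ excludes a negative max_turns: a negative count of turns is outside the function's natural
-- domain; B's cut-point indexing can raise there, while A's value (only the very last message) is
-- an accident of its loop.
def Pre_create_api_context_window (full_history : List (List (String × String))) (max_turns : Option Int) : Prop :=
  0 ≤ max_turns.getD 0
instance (full_history : List (List (String × String))) (max_turns : Option Int) : Decidable (Pre_create_api_context_window full_history max_turns) := by unfold Pre_create_api_context_window; infer_instance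

def pvWitness_create_api_context_window : (List (List (String × String))) × Option Int :=
  ([[("role", "user")], [("content", "x")]], some 1)

def Spec_create_api_context_window (full_history : List (List (String × String))) (max_turns : Option Int) (out : List (List (String × String))) : Prop := out = create_api_context_window_alt full_history max_turns
instance (full_history : List (List (String × String))) (max_turns : Option Int) (out : List (List (String × String))) : Decidable (Spec_create_api_context_window full_history max_turns out) := by unfold Spec_create_api_context_window; infer_instance

-- ===== CLAIM (what is proved, stated in full; the proofs are below) =====
def Claim_equal_create_api_context_window : Prop := ∀ (full_history : List (List (String × String))) (max_turns : Option Int), Dom_create_api_context_window full_history max_turns → Pre_create_api_context_window full_history max_turns → Spec_create_api_context_window full_history max_turns (create_api_context_window full_history max_turns)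

-- ===== LEMMAS AND PROOFS =====
-- number of iterations A's backward loop performs (= length of the kept suffix of rest)
def pvKA : List (List (String × String)) → Int → Bool → Nat
  | [], _, _ => 0
  | m :: ms, need, inT =>
    let inT' := if pvGetKey m "role" = some "user" then true else inT
    if pvGetKey m "role" = some "tool" ∧ pvGetKey m "name" = some "agent_end_task" ∧ inT' = true then
      if need - 1 ≤ 0 then 1 else 1 + pvKA ms (need - 1) false
    else
      if need ≤ 0 then 1 else 1 + pvKA ms need inT'

lemma pvKA_le (ms : List (List (String × String))) : ∀ need inT, pvKA ms need inT ≤ ms.length := by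
  induction ms with
  | nil => intro _ _; simp [pvKA]
  | cons m ms ih =>
      intro need inT
      simp only [pvKA, List.length_cons]
      split_ifs <;> first
        | omega
        | (rw [Nat.add_comm 1]; exact Nat.succ_le_succ (ih _ _))

-- A's loop output, flattened, is the processed prefix of the reversed list (reversed back)
lemma pvA_loop_flatten (maxT : Int) (ms : List (List (String × String))) :
    ∀ cur turns found inT,
      (pvA_loop maxT ms cur turns found inT).2 ++ (pvA_loop maxT ms cur turns found inT).1.flatten
        = (ms.take (pvKA ms (maxT - found) inT)).reverse ++ cur ++ turns.flatten := by
  induction ms with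
  | nil => intro cur turns found inT; simp [pvA_loop, pvKA]
  | cons m ms ih =>
      intro cur turns found inT
      simp only [pvA_loop, pvKA]
      by_cases hb : pvGetKey m "role" = some "tool" ∧ pvGetKey m "name" = some "agent_end_task" ∧
          (if pvGetKey m "role" = some "user" then true else inT) = true
      · simp only [if_pos hb]
        by_cases hstop : found + 1 ≥ maxT
        · rw [if_pos hstop, if_pos (by omega : maxT - found - 1 ≤ 0)]
          simp
        · rw [if_neg hstop, if_neg (by omega : ¬ (maxT - found - 1 ≤ 0))]
          rw [ih, show maxT - (found + 1) = maxT - found - 1 by omega,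
            Nat.add_comm 1 (pvKA ms (maxT - found - 1) false), List.take_succ_cons]
          simp
      · simp only [if_neg hb]
        by_cases hstop : found ≥ maxT
        · rw [if_pos hstop, if_pos (by omega : maxT - found ≤ 0)]
          simp
        · rw [if_neg hstop, if_neg (by omega : ¬ (maxT - found ≤ 0))]
          rw [ih, Nat.add_comm 1 _, List.take_succ_cons]
          simp

-- appending to the scanned list continues the scan from the accumulated state
lemma pvB_scan_append (l₁ l₂ : List (List (String × String))) :
    ∀ i cand bds,
      pvB_scan (l₁ ++ l₂) i cand bds
        = pvB_scan l₂ (i + l₁.length) (pvB_scan l₁ i cand bds).1 (pvB_scan l₁ i cand bds).2 := by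
  induction l₁ with
  | nil => intro i cand bds; simp [pvB_scan]
  | cons m ms ih =>
      intro i cand bds
      simp only [List.cons_append, pvB_scan, List.length_cons]
      split_ifs <;> rw [ih] <;> ring_nf

-- every recorded position (and the candidate) is below the scanned range's end
lemma pvB_scan_bounds (l : List (List (String × String))) :
    ∀ i cand bds,
      (∀ x ∈ bds, x < i) → (∀ p, cand = some p → p < i) →
      (∀ x ∈ (pvB_scan l i cand bds).2, x < i + l.length) ∧
      (∀ p, (pvB_scan l i cand bds).1 = some p → p < i + l.length) := by
  induction l with
  | nil =>
      intro i cand bds hb hc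
      simpa [pvB_scan] using ⟨fun x hx => hb x hx, fun p hp => hc p hp⟩
  | cons m ms ih =>
      intro i cand bds hb hc
      simp only [pvB_scan, List.length_cons]
      have harith : i + 1 + ms.length = i + (ms.length + 1) := by omega
      split_ifs with h1 h2
      · rw [← harith]
        exact ih (i + 1) (some i) bds (fun x hx => Nat.lt_succ_of_lt (hb x hx))
          (fun p hp => by cases hp; omega)
      · rw [← harith]
        refine ih (i + 1) none (bds ++ [cand.getD 0]) ?_ (by simp)
        intro x hx
        rcases List.mem_append.mp hx with h | h
        · exact Nat.lt_succ_of_lt (hb x h)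
        · simp at h
          subst h
          rcases h2 with ⟨_, hcand⟩
          cases cand with
          | none => simp at hcand
          | some p => have := hc p rfl; simpa using Nat.lt_succ_of_lt this
      · rw [← harith]
        exact ih (i + 1) cand bds (fun x hx => Nat.lt_succ_of_lt (hb x hx))
          (fun p hp => Nat.lt_succ_of_lt (hc p hp))

-- the effective boundary list: the scan's boundaries, plus the pending candidate when a
-- "virtual user after the end" (inT = true) is assumed
def pvEff (st : Option Nat × List Nat) (inT : Bool) : List Nat :=
  if inT then (match st.1 with | some p => st.2 ++ [p] | none => st.2) else st.2

-- the cut: suffix length kept when the t-th boundary from the right (if any) starts it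
def pvCut (L : List Nat) (t : Int) (n : Nat) : Nat :=
  if (t : Int) ≤ (L.length : Int) then n - L.getD (L.length - t.toNat) 0 else n

lemma pvGetD_mem (L : List Nat) (j : Nat) (h : j < L.length) : L.getD j 0 ∈ L := by
  rw [List.getD_eq_getElem _ _ h]; exact List.getElem_mem _

lemma pvCut_succ (L : List Nat) (t : Int) (n₀ : Nat) (ht : 1 ≤ t) (hL : ∀ x ∈ L, x < n₀) :
    1 + pvCut L t n₀ = pvCut L t (n₀ + 1) := by
  unfold pvCut
  split_ifs with h
  · have hj : L.length - t.toNat < L.length := by omega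
    have := hL _ (pvGetD_mem L _ hj)
    omega
  · omega

lemma pvCut_snoc (L : List Nat) (x₀ : Nat) (t : Int) (n₀ : Nat) (ht : 2 ≤ t) (hL : ∀ x ∈ L, x < n₀) :
    pvCut (L ++ [x₀]) t (n₀ + 1) = 1 + pvCut L (t - 1) n₀ := by
  unfold pvCut
  simp only [List.length_append, List.length_singleton]
  split_ifs with h1 h2
  · have hj : L.length + 1 - t.toNat < L.length := by omega
    rw [List.getD_append _ _ _ _ hj,
      show L.length + 1 - t.toNat = L.length - (t - 1).toNat by omega]
    have hj' : L.length - (t - 1).toNat < L.length := by omega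
    have := hL _ (pvGetD_mem L _ hj')
    omega
  · omega
  · omega
  · omega

lemma pvCut_snoc_one (L : List Nat) (x₀ : Nat) : pvCut (L ++ [x₀]) 1 (x₀ + 1) = 1 := by
  unfold pvCut
  rw [if_pos (by simp)]
  simp [List.getD_eq_getElem?_getD]

-- MAIN BRIDGE: A's backward iteration count = the cut determined by B's forward boundary scan
lemma pvKA_eq_scan (r : List (List (String × String))) :
    ∀ t : Int, 1 ≤ t → ∀ inT : Bool,
      pvKA r t inT = pvCut (pvEff (pvB_scan r.reverse 0 none []) inT) t r.length := by
  induction r with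
  | nil =>
      intro t ht inT
      cases inT <;> simp [pvKA, pvB_scan, pvEff, pvCut]
  | cons m r' ih =>
      intro t ht inT
      rcases hq : pvB_scan r'.reverse 0 none [] with ⟨cand₀, bds₀⟩
      have hbounds := pvB_scan_bounds r'.reverse 0 none [] (by simp) (by simp)
      rw [hq] at hbounds
      have hbds₀ : ∀ x ∈ bds₀, x < r'.length := by
        intro x hx; have := hbounds.1 x hx; simpa using this
      have hcand₀ : ∀ p, cand₀ = some p → p < r'.length := by
        intro p hp; have := hbounds.2 p hp; simpa using this
      have hscan : pvB_scan (m :: r').reverse 0 none []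
          = pvB_scan [m] r'.length cand₀ bds₀ := by
        rw [show (m :: r').reverse = r'.reverse ++ [m] by simp,
          pvB_scan_append r'.reverse [m] 0 none [], hq]
        simp
      rw [hq] at ih
      rw [hscan]
      simp only [pvB_scan, pvKA, pvGetKey, List.length_cons]
      by_cases hU : (PySem.Dict.mk m).get? "role" = some "user"
      · cases cand₀ with
        | some p =>
            have hp := hcand₀ p rfl
            have ih' := ih t ht true
            simp [pvEff] at ih'
            have hL : ∀ x ∈ bds₀ ++ [p], x < r'.length := by
              intro x hx
              rcases List.mem_append.mp hx with h | h
              · exact hbds₀ x h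
              · simp at h; subst h; exact hp
            simp only [hU, pvEff]
            simp
            rw [if_neg (show ¬ t ≤ 0 by omega), ih']
            exact pvCut_succ (bds₀ ++ [p]) t r'.length ht hL
        | none =>
            have ih' := ih t ht true
            simp [pvEff] at ih'
            simp only [hU, pvEff]
            simp
            rw [if_neg (show ¬ t ≤ 0 by omega), ih']
            exact pvCut_succ bds₀ t r'.length ht hbds₀
      · by_cases hE : (PySem.Dict.mk m).get? "role" = some "tool" ∧
            (PySem.Dict.mk m).get? "name" = some "agent_end_task"
        · obtain ⟨hT, hN⟩ := hE
          cases inT with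
          | false =>
              have ih' := ih t ht false
              simp [pvEff] at ih'
              simp only [hT, hN, pvEff]
              simp
              rw [if_neg (show ¬ t ≤ 0 by omega), ih']
              exact pvCut_succ bds₀ t r'.length ht hbds₀
          | true =>
              simp only [hT, hN, pvEff]
              simp
              by_cases ht1 : t - 1 ≤ 0
              · have ht1' : t = 1 := by omega
                subst ht1'
                rw [if_pos (le_refl (1 : Int))]
                exact (pvCut_snoc_one bds₀ r'.length).symm
              · have ih' := ih (t - 1) (by omega) false
                simp [pvEff] at ih'
                rw [if_neg (show ¬ t ≤ 1 by omega), ih']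
                exact (pvCut_snoc bds₀ r'.length t r'.length (by omega) hbds₀).symm
        · have hC2 : ¬ ((PySem.Dict.mk m).get? "role" = some "tool" ∧
              (PySem.Dict.mk m).get? "name" = some "agent_end_task" ∧ inT = true) :=
            fun h => hE ⟨h.1, h.2.1⟩
          have hCU : ¬ ((PySem.Dict.mk m).get? "role" = some "user" ∧ cand₀ ≠ none) :=
            fun h => hU h.1
          simp only [if_neg hU, if_neg hC2, if_neg (show ¬ t ≤ 0 by omega), if_neg hE,
            if_neg hCU]
          rw [ih t ht inT]
          have hL : ∀ x ∈ pvEff (cand₀, bds₀) inT, x < r'.length := by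
            intro x hx
            cases inT with
            | false => exact hbds₀ x (by simpa [pvEff] using hx)
            | true =>
                cases cand₀ with
                | none => exact hbds₀ x (by simpa [pvEff] using hx)
                | some p =>
                    simp only [pvEff, reduceIte] at hx
                    rcases List.mem_append.mp hx with h | h
                    · exact hbds₀ x h
                    · simp at h; subst h; exact hcand₀ _ rfl
          exact pvCut_succ (pvEff (cand₀, bds₀) inT) t r'.length ht hL

-- B's negative indexing, on the guarded range, is indexing from the right
lemma pvPyGet_neg {α : Type} (l : List α) (d : α) (t : Int) (h1 : 1 ≤ t) (h2 : t ≤ (l.length : Int)) :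
    (PySem.List.pyGet? l (-t)).getD d = l.getD (l.length - t.toNat) d := by
  simp only [PySem.List.pyGet?, PySem.List.pyIdx?]
  rw [if_neg (by omega), if_pos (by omega)]
  simp only [neg_neg, Option.bind_some, List.getD_eq_getElem?_getD]

-- A's system-prefix loop is take/drop at B's index
lemma pvA_sysLoop_eq (h : List (List (String × String))) :
    pvA_sysLoop h = (h.take (pvB_sysIdx h), h.drop (pvB_sysIdx h)) := by
  induction h with
  | nil => simp [pvA_sysLoop, pvB_sysIdx]
  | cons m hs ih =>
      simp only [pvA_sysLoop, pvB_sysIdx, pvGetKey]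
      split_ifs with h1
      · rw [ih]; simp
      · simp

-- A's whole computation, closed: the system prefix plus the suffix of length pvKA
lemma pvA_closed (fh : List (List (String × String))) (t : Int) (hnil : fh ≠ []) :
    create_api_context_window fh (some t)
      = fh.take (pvB_sysIdx fh) ++ (fh.drop (pvB_sysIdx fh)).drop
          ((fh.drop (pvB_sysIdx fh)).length - pvKA (fh.drop (pvB_sysIdx fh)).reverse t false) := by
  simp only [create_api_context_window, if_neg hnil]
  rw [pvA_sysLoop_eq fh]
  have hflat : ∀ res : (List (List (List (String × String))) × List (List (String × String))),
      (if res.2 ≠ [] then res.2 :: res.1 else res.1).flatten = res.2 ++ res.1.flatten := by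
    intro res; by_cases h : res.2 = [] <;> simp [h]
  rw [hflat]
  have hloop := pvA_loop_flatten t (fh.drop (pvB_sysIdx fh)).reverse [] [] 0 false
  rw [hloop]
  simp only [List.append_nil, List.flatten_nil, Int.sub_zero]
  have hrt : ((fh.drop (pvB_sysIdx fh)).reverse.take
        (pvKA (fh.drop (pvB_sysIdx fh)).reverse t false)).reverse
      = (fh.drop (pvB_sysIdx fh)).drop
        ((fh.drop (pvB_sysIdx fh)).length - pvKA (fh.drop (pvB_sysIdx fh)).reverse t false) := by
    rw [List.take_reverse]; simp
  rw [hrt]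

-- A's backward loop stops after one message when no further turns are needed
lemma pvKA_one (m : List (String × String)) (ms : List (List (String × String))) (inT : Bool) :
    pvKA (m :: ms) 0 inT = 1 := by
  simp only [pvKA]
  split_ifs <;> omega


-- ===== VERDICT (by name: the statement is the Claim_ definition above) =====
theorem create_api_context_window_spec : Claim_equal_create_api_context_window := by
  intro fh mt _ hpre
  unfold Spec_create_api_context_window
  cases mt with
  | none => by_cases hnil : fh = [] <;>
      simp [create_api_context_window, create_api_context_window_alt, hnil]
  | some t =>
      have ht0 : 0 ≤ t := by simpa [Pre_create_api_context_window] using hpre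
      by_cases hnil : fh = []
      · simp [create_api_context_window, create_api_context_window_alt, hnil]
      · rw [pvA_closed fh t hnil]
        simp only [create_api_context_window_alt, if_neg hnil]
        congr 1
        cases hr : fh.drop (pvB_sysIdx fh) with
        | nil => simp [PySem.List.slice_some_none]
        | cons m0 ms0 =>
            rcases hs : pvB_scan (m0 :: ms0) 0 none [] with ⟨cand, bds⟩
            have hbnd := pvB_scan_bounds (m0 :: ms0) 0 none [] (by simp) (by simp)
            rw [hs] at hbnd
            have hbds : ∀ x ∈ bds, x < (m0 :: ms0).length := by
              intro x hx; have := hbnd.1 x hx; simpa using this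
            have hcl : ((bds.map Int.ofNat ++ [((m0 :: ms0).length : Int) - 1]).length : Int)
                = (bds.length : Int) + 1 := by simp
            by_cases ht : t = 0
            · subst ht
              rw [if_pos (by rw [hcl]; omega)]
              rw [show (0 : Int) + 1 = 1 by omega,
                pvPyGet_neg _ 0 1 (le_refl 1) (by rw [hcl]; omega)]
              have hidx : (bds.map Int.ofNat ++ [((m0 :: ms0).length : Int) - 1]).length
                  - (1 : Int).toNat = bds.length := by simp
              have hgv : ((bds.map Int.ofNat ++ [((m0 :: ms0).length : Int) - 1]).getD
                    bds.length 0) = ((m0 :: ms0).length : Int) - 1 := by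
                rw [List.getD_eq_getElem?_getD,
                  List.getElem?_append_right (by simp : (bds.map Int.ofNat).length ≤ bds.length)]
                simp
              rw [hidx, hgv]
              have hk : pvKA (m0 :: ms0).reverse 0 false = 1 := by
                cases hrev : (m0 :: ms0).reverse with
                | nil =>
                    exfalso
                    have hlr := congrArg List.length hrev
                    simp only [List.length_reverse, List.length_cons, List.length_nil] at hlr
                    omega
                | cons x xs => exact pvKA_one x xs false
              rw [hk, PySem.List.slice_from _
                (show (0 : Int) ≤ ((m0 :: ms0).length : Int) - 1 by
                  push_cast [List.length_cons]; omega)]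
              congr 1
              omega
            · have ht1 : 1 ≤ t := by omega
              have hk := pvKA_le (m0 :: ms0).reverse t false
              rw [List.length_reverse] at hk
              have hmain := pvKA_eq_scan (m0 :: ms0).reverse t ht1 false
              rw [List.reverse_reverse, List.length_reverse, hs] at hmain
              simp only [pvEff, if_neg (Bool.false_ne_true), pvCut] at hmain
              by_cases hlen : (t : Int) ≤ ((bds.length : Nat) : Int)
              · rw [if_pos (by rw [hcl]; omega)]
                rw [pvPyGet_neg _ 0 (t + 1) (by omega) (by rw [hcl]; omega)]
                have hjlt : bds.length - t.toNat < bds.length := by omega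
                have hidx : (bds.map Int.ofNat ++ [((m0 :: ms0).length : Int) - 1]).length
                    - (t + 1).toNat = bds.length - t.toNat := by
                  simp only [List.length_append, List.length_map, List.length_cons, List.length_nil]
                  omega
                rw [hidx, List.getD_eq_getElem?_getD,
                  List.getElem?_append_left (by simpa using hjlt),
                  List.getElem?_map, List.getElem?_eq_getElem hjlt]
                simp only [Option.map_some, Option.getD_some]
                rw [Int.ofNat_eq_natCast]
                rw [PySem.List.slice_from _
                  (show (0 : Int) ≤ ((bds[bds.length - t.toNat] : Nat) : Int) by positivity),
                  Int.toNat_natCast]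
                rw [List.getD_eq_getElem _ _ hjlt] at hmain
                rw [hmain, if_pos hlen]
                have hx : bds[bds.length - t.toNat] < (m0 :: ms0).length :=
                  hbds _ (List.getElem_mem _)
                congr 1
                omega
              · rw [if_neg (by rw [hcl]; omega)]
                rw [hmain, if_neg hlen]
                rw [PySem.List.slice_from _ (le_refl 0)]
                simp
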